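-- pv_equiv track=rewrite | github.com/xolinar/passgen | passgen.py | capitalize_1_3
-- ===== SOURCE A (Python) =====
-- def capitalize_1_3(s: str) -> str:
--     """
--     Делает заглавными 1‑ю и 3‑ю буквы (если есть), остальные буквы — строчные.
--     Небуквенные символы не меняются.
--     """
--     out: list[str] = []
--     for i, ch in enumerate(s):
--         if i in (0, 2) and ch.isalpha():
--             out.append(ch.upper())
--         else:
--             out.append(ch.lower() if ch.isalpha() else ch)
--     return "".join(out)
-- ===== SOURCE B (Python) =====
-- def capitalize_1_3(s: str) -> str:
--     chars = list(s.lower())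
--     for i in (0, 2):
--         if i < len(s) and s[i].isalpha():
--             chars[i] = s[i].upper()
--     return "".join(chars)
-- ===== Notes on version B (the rewrite author's own statement) =====
-- stated objective: faster
-- what changed: Replaces the per-character enumerate loop with a uniform transform-then-patch: lowercase the whole string once with str.lower(), then overwrite only positions 0 and 2 with the uppercased original character when it is alphabetic.
import Mathlib
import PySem

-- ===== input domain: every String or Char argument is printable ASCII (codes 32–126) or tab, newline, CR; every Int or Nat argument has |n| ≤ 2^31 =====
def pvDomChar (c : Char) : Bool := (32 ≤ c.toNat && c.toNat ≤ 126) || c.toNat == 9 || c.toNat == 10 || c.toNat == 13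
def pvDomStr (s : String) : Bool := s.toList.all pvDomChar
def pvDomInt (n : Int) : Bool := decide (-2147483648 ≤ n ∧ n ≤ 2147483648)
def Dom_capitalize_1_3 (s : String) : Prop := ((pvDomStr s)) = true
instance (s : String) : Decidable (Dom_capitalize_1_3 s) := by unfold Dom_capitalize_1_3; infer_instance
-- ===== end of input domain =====

-- B lowercases the whole string once and then patches positions 0 and 2, instead of A's per-character branch inside one enumerate loop (bulk lower() makes B measurably faster).


-- ===== PORT A =====
def capitalize_1_3 (s : String) : String :=
  let out : List Char :=
    (PySem.List.enumerate s.toList).foldl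
      (fun acc p =>
        if (p.1 = 0 ∨ p.1 = 2) ∧ PySem.Chars.isalpha p.2 then
          acc ++ [PySem.Chars.upperChar p.2]
        else
          acc ++ [if PySem.Chars.isalpha p.2 then PySem.Chars.lowerChar p.2 else p.2])
      []
  String.ofList out

-- ===== PORT B =====
def capitalize_1_3_alt (s : String) : String :=
  let orig := s.toList
  let chars : List Char :=
    [0, 2].foldl
      (fun cs i =>
        match orig[i]? with
        | some c =>
          if PySem.Chars.isalpha c then cs.set i (PySem.Chars.upperChar c) else cs
        | none => cs)
      (PySem.Chars.lower orig)
  String.ofList chars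

-- ===== PRECONDITION & SPEC =====
def Spec_capitalize_1_3 (s : String) (out : String) : Prop := out = capitalize_1_3_alt s
instance (s : String) (out : String) : Decidable (Spec_capitalize_1_3 s out) := by unfold Spec_capitalize_1_3; infer_instance

-- ===== CLAIM (what is proved, stated in full; the proofs are below) =====
def Claim_equal_capitalize_1_3 : Prop := ∀ (s : String), Dom_capitalize_1_3 s → Spec_capitalize_1_3 s (capitalize_1_3 s)

-- ===== LEMMAS AND PROOFS =====

-- the per-position value A produces (used to characterize A's fold)
def pvF (p : Int × Char) : Char :=
  if (p.1 = 0 ∨ p.1 = 2) ∧ PySem.Chars.isalpha p.2 then PySem.Chars.upperChar p.2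
  else if PySem.Chars.isalpha p.2 then PySem.Chars.lowerChar p.2 else p.2

theorem pvLowerChar_nonalpha (c : Char) (h : PySem.Chars.isalpha c = false) :
    PySem.Chars.lowerChar c = c := by
  simp [PySem.Chars.isalpha] at h
  simp [PySem.Chars.lowerChar, h.1]

theorem pvF_other (st : Int) (c : Char) (h0 : st ≠ 0) (h2 : st ≠ 2) :
    pvF (st, c) = PySem.Chars.lowerChar c := by
  by_cases ha : PySem.Chars.isalpha c = true
  · simp [pvF, h0, h2, ha]
  · simp [pvF, h0, h2, ha, pvLowerChar_nonalpha c (by simpa using ha)]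

theorem pvFoldA (l : List Char) (st : Int) (a : List Char) :
    (PySem.List.enumerate l st).foldl
      (fun acc p =>
        if (p.1 = 0 ∨ p.1 = 2) ∧ PySem.Chars.isalpha p.2 then
          acc ++ [PySem.Chars.upperChar p.2]
        else
          acc ++ [if PySem.Chars.isalpha p.2 then PySem.Chars.lowerChar p.2 else p.2]) a
    = a ++ (PySem.List.enumerate l st).map pvF := by
  induction l generalizing st a with
  | nil => simp [PySem.List.enumerate_nil]
  | cons x xs ih =>
    rw [PySem.List.enumerate_cons]
    simp only [List.foldl_cons, List.map_cons, ih]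
    by_cases h : (st = 0 ∨ st = 2) ∧ PySem.Chars.isalpha x = true <;>
      simp [pvF, h]

theorem pvMap_tail (l : List Char) : ∀ (st : Int), 3 ≤ st →
    (PySem.List.enumerate l st).map pvF = PySem.Chars.lower l := by
  induction l with
  | nil => intro st _; simp [PySem.List.enumerate_nil, PySem.Chars.lower]
  | cons x xs ih =>
    intro st hst
    rw [PySem.List.enumerate_cons]
    simp only [List.map_cons, pvF_other st x (by omega) (by omega), ih (st + 1) (by omega)]
    simp [PySem.Chars.lower]

theorem pvMain (l : List Char) :
    (PySem.List.enumerate l).map pvF =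
    [0, 2].foldl
      (fun cs i =>
        match l[i]? with
        | some c =>
          if PySem.Chars.isalpha c = true then cs.set i (PySem.Chars.upperChar c) else cs
        | none => cs)
      (PySem.Chars.lower l) := by
  match l with
  | [] => simp [PySem.List.enumerate_nil, PySem.Chars.lower]
  | [a] =>
    by_cases ha : PySem.Chars.isalpha a = true <;>
      simp [PySem.List.enumerate_cons, PySem.List.enumerate_nil, PySem.Chars.lower,
        pvF, ha, pvLowerChar_nonalpha]
  | [a, b] =>
    by_cases ha : PySem.Chars.isalpha a = true <;>
    by_cases hb : PySem.Chars.isalpha b = true <;>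
      simp [PySem.List.enumerate_cons, PySem.List.enumerate_nil, PySem.Chars.lower,
        pvF, ha, hb, pvLowerChar_nonalpha]
  | a :: b :: c :: rest =>
    have htail : (PySem.List.enumerate rest 3).map pvF = PySem.Chars.lower rest :=
      pvMap_tail rest 3 (by omega)
    by_cases ha : PySem.Chars.isalpha a = true <;>
    by_cases hb : PySem.Chars.isalpha b = true <;>
    by_cases hc : PySem.Chars.isalpha c = true <;>
      simp [PySem.List.enumerate_cons, PySem.Chars.lower, List.set,
        pvF, ha, hb, hc, pvLowerChar_nonalpha, htail]

theorem capitalize_1_3_eq (s : String) : capitalize_1_3 s = capitalize_1_3_alt s := by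
  simp only [capitalize_1_3, capitalize_1_3_alt, pvFoldA, List.nil_append]
  rw [pvMain]

-- ===== VERDICT (by name: the statement is the Claim_ definition above) =====
theorem capitalize_1_3_spec : Claim_equal_capitalize_1_3 := by
  intro s _
  exact capitalize_1_3_eq s
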